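-- pv_equiv track=rewrite | github.com/ltyiz07/project_timetable | table_trial_2.py | sort_time
-- ===== SOURCE A (Python) =====
-- def sort_time(set_1):
--     """
--
--     :param set_1:
--     :return:
--     """
--     list_time = []
--     for j in range(7):
--         list_time.append([])
--     for i in set_1:
--         if i[4] == '1':
--             list_time[0].append(i)
--     for i in set_1:
--         if i[4] == '2':
--             list_time[1].append(i)
--     for i in set_1:
--         if i[4] == '3':
--             list_time[2].append(i)
--     for i in set_1:
--         if i[4] == '4':
--             list_time[3].append(i)
--     for i in set_1:
--         if i[4] == '5':
--             list_time[4].append(i)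
--     for i in set_1:
--         if i[4] == '6':
--             list_time[5].append(i)
--     for i in set_1:
--         if i[4] == '7':
--             list_time[6].append(i)
--     list_time = list_time
--     return list_time
-- ===== SOURCE B (Python) =====
-- def sort_time(set_1):
--     list_time = [[] for _ in range(7)]
--     index_map = {'1': 0, '2': 1, '3': 2, '4': 3, '5': 4, '6': 5, '7': 6}
--     for i in set_1:
--         idx = index_map.get(i[4])
--         if idx is not None:
--             list_time[idx].append(i)
--     return list_time
-- ===== Notes on version B (the rewrite author's own statement) =====
-- stated objective: simpler
-- what changed: Replaces A's seven separate scans of set_1 (one per bucket character) with a single pass that looks up each element's 5th character in an index map and appends to the matching bucket.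
import Mathlib
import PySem

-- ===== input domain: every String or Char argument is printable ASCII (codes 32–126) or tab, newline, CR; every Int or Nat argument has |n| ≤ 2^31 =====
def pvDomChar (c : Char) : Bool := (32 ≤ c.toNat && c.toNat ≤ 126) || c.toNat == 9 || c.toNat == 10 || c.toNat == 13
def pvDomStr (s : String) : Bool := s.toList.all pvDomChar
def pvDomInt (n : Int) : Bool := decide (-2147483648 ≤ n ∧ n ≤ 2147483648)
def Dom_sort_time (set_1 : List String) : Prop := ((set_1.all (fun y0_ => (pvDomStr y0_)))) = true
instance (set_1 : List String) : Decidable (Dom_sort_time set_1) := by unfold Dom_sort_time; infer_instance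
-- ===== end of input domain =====

-- B replaces A's seven separate scans of the input (one per bucket digit) with a single
-- index-map-driven pass; same bucket contents and within-bucket order.


-- ===== PORT A =====
-- A: seven passes over set_1; pass k appends to bucket k the elements whose 5th character
-- is the digit k+1 (each Python loop 'for i in set_1: if i[4]==c: bucket.append(i)' is the fold below).
def pvBucket (set_1 : List String) (c : Char) : List String :=
  set_1.foldl (fun acc i => if PySem.Str.pyGet? i 4 = some c then acc ++ [i] else acc) []

def sort_time (set_1 : List String) : List (List String) :=
  [pvBucket set_1 '1', pvBucket set_1 '2', pvBucket set_1 '3', pvBucket set_1 '4',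
   pvBucket set_1 '5', pvBucket set_1 '6', pvBucket set_1 '7']

-- ===== PORT B =====
def pvIndexMap : PySem.Dict Char Int :=
  PySem.Dict.ofList [('1', 0), ('2', 1), ('3', 2), ('4', 3), ('5', 4), ('6', 5), ('7', 6)]

def sort_time_alt (set_1 : List String) : List (List String) :=
  set_1.foldl (fun lt i =>
      match PySem.Str.pyGet? i 4 with
      | none => lt          -- i[4] raises IndexError in Python; excluded by Pre_sort_time
      | some ch =>
        match pvIndexMap.get? ch with
        | none => lt
        | some idx => lt.modify idx.toNat (· ++ [i]))
    [[], [], [], [], [], [], []]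

-- ===== PRECONDITION & SPEC =====
-- Pre_ excludes exactly the inputs on which Python A raises IndexError (some element shorter
-- than 5 characters, so i[4] fails); B raises the same way there.
def Pre_sort_time (set_1 : List String) : Prop := ∀ s ∈ set_1, 5 ≤ s.length
instance (set_1 : List String) : Decidable (Pre_sort_time set_1) := by
  unfold Pre_sort_time; infer_instance
def pvWitness_sort_time : List String := ["abcd1", "abcd7", "xxxx9", "abcd1x"]

def Spec_sort_time (set_1 : List String) (out : List (List String)) : Prop := out = sort_time_alt set_1
instance (set_1 : List String) (out : List (List String)) : Decidable (Spec_sort_time set_1 out) := by unfold Spec_sort_time; infer_instance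

-- ===== CLAIM (what is proved, stated in full; the proofs are below) =====
def Claim_equal_sort_time : Prop := ∀ (set_1 : List String), Dom_sort_time set_1 → Pre_sort_time set_1 → Spec_sort_time set_1 (sort_time set_1)

-- ===== LEMMAS AND PROOFS =====

-- the elements whose 5th character is c, in input order
def pvF (c : Char) (s : List String) : List String :=
  s.filter (fun i => decide (PySem.Str.pyGet? i 4 = some c))

theorem pvBucket_eq_filter (s : List String) (c : Char) : pvBucket s c = pvF c s := by
  unfold pvBucket pvF
  rw [PySem.List.foldl_append_ite_eq_filter]
  simp

theorem pvGet_indexMap (ch : Char) : pvIndexMap.get? ch =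
    if ch = '7' then some 6 else if ch = '6' then some 5 else if ch = '5' then some 4
    else if ch = '4' then some 3 else if ch = '3' then some 2 else if ch = '2' then some 1
    else if ch = '1' then some 0 else none := by
  simp only [pvIndexMap, PySem.Dict.ofList, PySem.Dict.update, List.foldl_cons, List.foldl_nil,
    PySem.Dict.get?_insert, PySem.Dict.get?_empty]

theorem pvAlt_invariant (s : List String) (l0 l1 l2 l3 l4 l5 l6 : List String) :
    s.foldl (fun lt i =>
      match PySem.Str.pyGet? i 4 with
      | none => lt
      | some ch =>
        match pvIndexMap.get? ch with
        | none => lt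
        | some idx => lt.modify idx.toNat (· ++ [i]))
      [l0, l1, l2, l3, l4, l5, l6]
    = [l0 ++ pvF '1' s, l1 ++ pvF '2' s, l2 ++ pvF '3' s, l3 ++ pvF '4' s,
       l4 ++ pvF '5' s, l5 ++ pvF '6' s, l6 ++ pvF '7' s] := by
  induction s generalizing l0 l1 l2 l3 l4 l5 l6 with
  | nil => simp [pvF]
  | cons x xs ih =>
    simp only [List.foldl_cons]
    rcases hx : PySem.Str.pyGet? x 4 with _ | ch <;> dsimp only
    · have hx' : PySem.List.pyGet? x.toList 4 = none := by simpa using hx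
      rw [ih]
      simp [pvF, List.filter_cons, hx']
    · have hx' : PySem.List.pyGet? x.toList 4 = some ch := by simpa using hx
      rw [pvGet_indexMap]
      split_ifs with h7 h6 h5 h4 h3 h2 h1 <;> dsimp only
      · rw [show [l0,l1,l2,l3,l4,l5,l6].modify ((6:Int).toNat) (fun a => a ++ [x]) = [l0,l1,l2,l3,l4,l5,l6 ++ [x]] from rfl, ih]
        simp [pvF, List.filter_cons, hx', h7]
      · rw [show [l0,l1,l2,l3,l4,l5,l6].modify ((5:Int).toNat) (fun a => a ++ [x]) = [l0,l1,l2,l3,l4,l5 ++ [x],l6] from rfl, ih]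
        simp [pvF, List.filter_cons, hx', h7, h6]
      · rw [show [l0,l1,l2,l3,l4,l5,l6].modify ((4:Int).toNat) (fun a => a ++ [x]) = [l0,l1,l2,l3,l4 ++ [x],l5,l6] from rfl, ih]
        simp [pvF, List.filter_cons, hx', h7, h6, h5]
      · rw [show [l0,l1,l2,l3,l4,l5,l6].modify ((3:Int).toNat) (fun a => a ++ [x]) = [l0,l1,l2,l3 ++ [x],l4,l5,l6] from rfl, ih]
        simp [pvF, List.filter_cons, hx', h7, h6, h5, h4]
      · rw [show [l0,l1,l2,l3,l4,l5,l6].modify ((2:Int).toNat) (fun a => a ++ [x]) = [l0,l1,l2 ++ [x],l3,l4,l5,l6] from rfl, ih]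
        simp [pvF, List.filter_cons, hx', h7, h6, h5, h4, h3]
      · rw [show [l0,l1,l2,l3,l4,l5,l6].modify ((1:Int).toNat) (fun a => a ++ [x]) = [l0,l1 ++ [x],l2,l3,l4,l5,l6] from rfl, ih]
        simp [pvF, List.filter_cons, hx', h7, h6, h5, h4, h3, h2]
      · rw [show [l0,l1,l2,l3,l4,l5,l6].modify ((0:Int).toNat) (fun a => a ++ [x]) = [l0 ++ [x],l1,l2,l3,l4,l5,l6] from rfl, ih]
        simp [pvF, List.filter_cons, hx', h7, h6, h5, h4, h3, h2, h1]
      · rw [ih]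
        simp [pvF, List.filter_cons, hx', h1, h2, h3, h4, h5, h6, h7]

-- ===== VERDICT (by name: the statement is the Claim_ definition above) =====
theorem sort_time_spec : Claim_equal_sort_time := by
  intro set_1 _ _
  unfold Spec_sort_time sort_time sort_time_alt
  rw [pvAlt_invariant]
  simp [pvBucket_eq_filter]
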